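-- pv_equiv track=rewrite | github.com/handorff/advent-of-code | 2024/21/21.py | is_reasonable_num_permutation
-- ===== SOURCE A (Python) =====
-- from collections import defaultdict
--
-- def move_numeric_robot(direction, square):
--   d = {
--     '^4': '7',
--     '^5': '8',
--     '^6': '9',
--     '^1': '4',
--     '^2': '5',
--     '^3': '6',
--     '^0': '2',
--     '^A': '3',
--     'v7': '4',
--     'v8': '5',
--     'v9': '6',
--     'v4': '1',
--     'v5': '2',
--     'v6': '3',
--     'v2': '0',
--     'v3': 'A',
--     '>7': '8',
--     '>4': '5',
--     '>1': '2',
--     '>8': '9',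
--     '>5': '6',
--     '>2': '3',
--     '>0': 'A',
--     '<8': '7',
--     '<5': '4',
--     '<2': '1',
--     '<9': '8',
--     '<6': '5',
--     '<3': '2',
--     '<A': '0'
--   }
--   if (direction + square) in d:
--     return d[direction + square]
--   return None
--
-- def is_reasonable_num_permutation(start, button_sequence):
--   square = start
--   for b in button_sequence:
--     square = move_numeric_robot(b, square)
--     if square is None:
--       return False
--
--   # assumption: should always have consecutive button presses in a row
--   index_dict = defaultdict(list)
--   for i, b in enumerate(button_sequence):
--     index_dict[b].append(i)
--   assert len(index_dict) < 3
--   if len(index_dict) == 2: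
--     [i1, i2] = index_dict.values()
--     return max(i1) < min(i2) or max(i2) < min(i1)
--
--   else:
--     return True
-- ===== SOURCE B (Python) =====
-- def is_reasonable_num_permutation(start, button_sequence):
--     POS = {'7': (0, 0), '8': (0, 1), '9': (0, 2),
--            '4': (1, 0), '5': (1, 1), '6': (1, 2),
--            '1': (2, 0), '2': (2, 1), '3': (2, 2),
--            '0': (3, 1), 'A': (3, 2)}
--     DELTA = {'^': (-1, 0), 'v': (1, 0), '<': (0, -1), '>': (0, 1)}
--     cells = set(POS.values())
--     cur = POS.get(start)
--     for b in button_sequence: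
--         if cur is None or b not in DELTA:
--             return False
--         dr, dc = DELTA[b]
--         cur = (cur[0] + dr, cur[1] + dc)
--         if cur not in cells:
--             return False
--     # reasonable = at most one change of button along the sequence
--     changes = sum(1 for u, v in zip(button_sequence, button_sequence[1:]) if u != v)
--     return changes <= 1
-- ===== Notes on version B (the rewrite author's own statement) =====
-- stated objective: simpler
-- what changed: B replaces A's 31-entry move lookup table by (row,col) coordinate arithmetic on the 789/456/123/_0A grid, and replaces A's index-dict (defaultdict of index lists plus min/max comparisons) contiguity test by a single pass counting adjacent button changes (reasonable iff at most one change).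
-- outside the precondition, e.g. on is_reasonable_num_permutation('', ['^4']): A returns True, B returns False; on is_reasonable_num_permutation('^4', ['']): A returns True, B returns False
import Mathlib
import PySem

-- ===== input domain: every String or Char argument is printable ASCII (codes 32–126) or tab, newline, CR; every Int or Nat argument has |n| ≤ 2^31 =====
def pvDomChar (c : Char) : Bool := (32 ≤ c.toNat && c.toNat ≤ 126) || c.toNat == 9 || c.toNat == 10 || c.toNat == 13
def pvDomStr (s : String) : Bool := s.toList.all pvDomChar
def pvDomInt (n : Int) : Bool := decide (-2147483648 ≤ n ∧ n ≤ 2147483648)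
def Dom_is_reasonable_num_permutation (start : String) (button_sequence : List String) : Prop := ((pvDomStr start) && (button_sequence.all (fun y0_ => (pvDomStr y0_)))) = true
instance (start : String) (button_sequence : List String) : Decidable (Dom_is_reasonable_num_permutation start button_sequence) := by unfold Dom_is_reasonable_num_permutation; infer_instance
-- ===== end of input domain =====

-- B replaces A's 31-entry move lookup table by coordinate arithmetic on the keypad grid and A's
-- per-button index-dict contiguity test by a single count of adjacent button changes (objective:
-- simpler).  Strings are handled on the List Char side throughout, per the PySem convention.

-- ===== PORT A =====

-- the literal dict of move_numeric_robot ('^4' ↦ '7', …), keys/values as Char lists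
def pvNumKeys : List (List Char × List Char) :=
  [ (['^','4'], ['7']), (['^','5'], ['8']), (['^','6'], ['9']),
    (['^','1'], ['4']), (['^','2'], ['5']), (['^','3'], ['6']),
    (['^','0'], ['2']), (['^','A'], ['3']),
    (['v','7'], ['4']), (['v','8'], ['5']), (['v','9'], ['6']),
    (['v','4'], ['1']), (['v','5'], ['2']), (['v','6'], ['3']),
    (['v','2'], ['0']), (['v','3'], ['A']),
    (['>','7'], ['8']), (['>','4'], ['5']), (['>','1'], ['2']),
    (['>','8'], ['9']), (['>','5'], ['6']), (['>','2'], ['3']),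
    (['>','0'], ['A']),
    (['<','8'], ['7']), (['<','5'], ['4']), (['<','2'], ['1']),
    (['<','9'], ['8']), (['<','6'], ['5']), (['<','3'], ['2']),
    (['<','A'], ['0']) ]

-- `if (direction + square) in d: return d[...]; return None` = first-match lookup
def move_numeric_robot (direction square : List Char) : Option (List Char) :=
  (PySem.Dict.ofList pvNumKeys).get? (direction ++ square)

-- the `for b in button_sequence` walk; `none` = the loop returned False
def pvLoopA : List Char → List (List Char) → Option (List Char)
  | sq, [] => some sq
  | sq, b :: rest =>
    match move_numeric_robot b sq with
    | none => none
    | some sq' => pvLoopA sq' rest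

def is_reasonable_num_permutation (start : String) (button_sequence : List String) : Bool :=
  let bs := button_sequence.map String.toList
  match pvLoopA start.toList bs with
  | none => false
  | some _ =>
    -- index_dict[b].append(i) over enumerate(button_sequence)
    let index_dict := (PySem.List.enumerate bs).foldl
        (fun d p => d.modify p.2 [] (fun l => l ++ [p.1])) PySem.Dict.empty
    -- Python asserts len(index_dict) < 3 (AssertionError); Pre_ excludes those inputs,
    -- so the port just falls through to the else-branch there
    if index_dict.size == 2 then
      match index_dict.values with
      | [i1, i2] =>
        match PySem.List.max? i1 (fun v => v), PySem.List.min? i2 (fun v => v),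
              PySem.List.max? i2 (fun v => v), PySem.List.min? i1 (fun v => v) with
        | some M1, some m2, some M2, some m1 => decide (M1 < m2) || decide (M2 < m1)
        | _, _, _, _ => false      -- unreachable: i1, i2 are nonempty
      | _ => false                 -- unreachable: size == 2
    else true

-- ===== PORT B =====

-- POS: button ↦ (row, col) on the grid 789 / 456 / 123 / _0A
def pvPOS : PySem.Dict (List Char) (Int × Int) := PySem.Dict.ofList
  [ (['7'],(0,0)), (['8'],(0,1)), (['9'],(0,2)),
    (['4'],(1,0)), (['5'],(1,1)), (['6'],(1,2)),
    (['1'],(2,0)), (['2'],(2,1)), (['3'],(2,2)),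
    (['0'],(3,1)), (['A'],(3,2)) ]

def pvDELTA : PySem.Dict (List Char) (Int × Int) := PySem.Dict.ofList
  [ (['^'],(-1,0)), (['v'],(1,0)), (['<'],(0,-1)), (['>'],(0,1)) ]

-- cells = set(POS.values())
def pvCellsB : List (Int × Int) := PySem.Set.ofList pvPOS.values

-- B's walk over coordinates
def pvLoopB : Option (Int × Int) → List (List Char) → Bool
  | _, [] => true
  | none, _ :: _ => false
  | some cur, b :: rest =>
    match pvDELTA.get? b with
    | none => false
    | some d =>
      let nxt := (cur.1 + d.1, cur.2 + d.2)
      if PySem.Set.contains pvCellsB nxt then pvLoopB (some nxt) rest else false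

def is_reasonable_num_permutation_alt (start : String) (button_sequence : List String) : Bool :=
  let bs := button_sequence.map String.toList
  if pvLoopB (pvPOS.get? start.toList) bs then
    -- changes = sum(1 for u, v in zip(seq, seq[1:]) if u != v); return changes <= 1
    decide ((bs.zip bs.tail).countP (fun p => !(p.1 == p.2)) ≤ 1)
  else false

-- ===== PRECONDITION & SPEC =====

-- helpers for Pre_ (independent of both ports): the keypad geometry and A's raise condition
def pvCellOf (c : Char) : Option (Int × Int) :=
  if c = '7' then some (0,0) else if c = '8' then some (0,1) else if c = '9' then some (0,2) else
  if c = '4' then some (1,0) else if c = '5' then some (1,1) else if c = '6' then some (1,2) else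
  if c = '1' then some (2,0) else if c = '2' then some (2,1) else if c = '3' then some (2,2) else
  if c = '0' then some (3,1) else if c = 'A' then some (3,2) else none

def pvDirOf (c : Char) : Option (Int × Int) :=
  if c = '^' then some (-1,0) else if c = 'v' then some (1,0) else
  if c = '<' then some (0,-1) else if c = '>' then some (0,1) else none

def pvOnPad (p : Int × Int) : Bool :=
  (0 ≤ p.1 && p.1 < 4 && 0 ≤ p.2 && p.2 < 3) && !(p.1 == 3 && p.2 == 0)

def pvStartCell (s : String) : Option (Int × Int) :=
  match s.toList with
  | [] => none
  | c :: rest => if rest = [] then pvCellOf c else none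

-- does the whole walk stay on the keypad?
def pvWalkOk : Option (Int × Int) → List String → Bool
  | _, [] => true
  | none, _ :: _ => false
  | some cur, b :: rest =>
    match b.toList with
    | [] => false
    | d :: ds =>
      if ds = [] then
        match pvDirOf d with
        | none => false
        | some δ =>
          let nxt := (cur.1 + δ.1, cur.2 + δ.2)
          if pvOnPad nxt then pvWalkOk (some nxt) rest else false
      else false

def pvKeyStrs : List (List Char) :=
  [ ['^','4'], ['^','5'], ['^','6'], ['^','1'], ['^','2'], ['^','3'], ['^','0'], ['^','A'],
    ['v','7'], ['v','8'], ['v','9'], ['v','4'], ['v','5'], ['v','6'], ['v','2'], ['v','3'],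
    ['>','7'], ['>','4'], ['>','1'], ['>','8'], ['>','5'], ['>','2'], ['>','0'],
    ['<','8'], ['<','5'], ['<','2'], ['<','9'], ['<','6'], ['<','3'], ['<','A'] ]

-- the accidental split-key corner: an empty start (resp. empty first button) whose neighbour
-- spells a whole 2-character table key, so A's string concatenation performs a "move"
def pvCorner (start : String) (button_sequence : List String) : Prop :=
  ∃ b ∈ button_sequence.take 1,
    (start.toList = [] ∧ b.toList ∈ pvKeyStrs) ∨ (b.toList = [] ∧ start.toList ∈ pvKeyStrs)

-- Pre_ excludes (i) inputs outside the natural domain where an empty-string start or first button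
-- concatenates with its neighbour into a whole 2-char table key (A then "moves" from a non-button,
-- an artefact of the dict-key concatenation; B rejects the empty string as a button), and
-- (ii) the inputs on which A's `assert len(index_dict) < 3` raises AssertionError
-- (a fully valid walk pressing ≥ 3 distinct buttons).
def Pre_is_reasonable_num_permutation (start : String) (button_sequence : List String) : Prop :=
  ¬ pvCorner start button_sequence ∧
  ¬ (pvWalkOk (pvStartCell start) button_sequence = true ∧
     3 ≤ (PySem.Set.ofList (button_sequence.map String.toList)).length)

instance (start : String) (button_sequence : List String) : Decidable (Pre_is_reasonable_num_permutation start button_sequence) := by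
  unfold Pre_is_reasonable_num_permutation; unfold pvCorner; infer_instance

def pvWitness_is_reasonable_num_permutation : String × List String := ("A", ["^", "^"])

def Spec_is_reasonable_num_permutation (start : String) (button_sequence : List String) (out : Bool) : Prop := out = is_reasonable_num_permutation_alt start button_sequence
instance (start : String) (button_sequence : List String) (out : Bool) : Decidable (Spec_is_reasonable_num_permutation start button_sequence out) := by unfold Spec_is_reasonable_num_permutation; infer_instance

-- ===== CLAIM (what is proved, stated in full; the proofs are below) =====
def Claim_equal_is_reasonable_num_permutation : Prop := ∀ (start : String) (button_sequence : List String), Dom_is_reasonable_num_permutation start button_sequence → Pre_is_reasonable_num_permutation start button_sequence → Spec_is_reasonable_num_permutation start button_sequence (is_reasonable_num_permutation start button_sequence)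

-- ===== LEMMAS AND PROOFS =====

-- proof-side abbreviations
def pvCharAt (p : Int × Int) : Char :=
  if p = (0,0) then '7' else if p = (0,1) then '8' else if p = (0,2) then '9' else
  if p = (1,0) then '4' else if p = (1,1) then '5' else if p = (1,2) then '6' else
  if p = (2,0) then '1' else if p = (2,1) then '2' else if p = (2,2) then '3' else
  if p = (3,1) then '0' else if p = (3,2) then 'A' else ' '

-- adjacent-change count (B's phase 2)
def pvT (bs : List (List Char)) : Nat := (bs.zip bs.tail).countP (fun p => !(p.1 == p.2))

-- the list of indices of c in bs, as A's index_dict stores it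
def pvE (bs : List (List Char)) (c : List Char) : List Int :=
  (((PySem.List.enumerate bs).map Prod.swap).filter (fun p => p.1 == c)).map (fun p => p.2)

-- A's index_dict
def pvDD (bs : List (List Char)) : PySem.Dict (List Char) (List Int) :=
  (PySem.List.enumerate bs).foldl (fun d p => d.modify p.2 [] (fun l => l ++ [p.1])) PySem.Dict.empty

-- ---------- keypad geometry lemmas ----------

theorem pv_pad_cell (p : Int × Int) (h : pvOnPad p = true) : pvCellOf (pvCharAt p) = some p := by
  rcases p with ⟨r, c⟩
  simp [pvOnPad] at h
  obtain ⟨h14, h5⟩ := h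
  have hr : r = 0 ∨ r = 1 ∨ r = 2 ∨ r = 3 := by omega
  have hcc : c = 0 ∨ c = 1 ∨ c = 2 := by omega
  have h5' : ¬ (r = 3 ∧ c = 0) := by omega
  rcases hr with rfl | rfl | rfl | rfl <;> rcases hcc with rfl | rfl | rfl <;>
    first | (exact absurd ⟨rfl, rfl⟩ h5') | decide

theorem pv_move_none_of_not_dir (a c : Char) (hnone : pvDirOf a = none) :
    move_numeric_robot [a] [c] = none := by
  have a1 : ¬ '^' = a := by rintro rfl; simp [pvDirOf] at hnone
  have a2 : ¬ 'v' = a := by rintro rfl; simp [pvDirOf] at hnone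
  have a3 : ¬ '<' = a := by rintro rfl; simp [pvDirOf] at hnone
  have a4 : ¬ '>' = a := by rintro rfl; simp [pvDirOf] at hnone
  show (PySem.Dict.mk pvNumKeys).get? ([a] ++ [c]) = none
  simp [pvNumKeys, a1, a2, a3, a4, PySem.Dict.get?]

set_option maxHeartbeats 1000000 in
theorem pv_step_eq (a c : Char) (cell : Int × Int) (hc : pvCellOf c = some cell) :
    move_numeric_robot [a] [c] =
      (match pvDirOf a with
       | none => none
       | some d =>
         if pvOnPad (cell.1 + d.1, cell.2 + d.2) then some [pvCharAt (cell.1 + d.1, cell.2 + d.2)]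
         else none) := by
  have hdir : a = '^' ∨ a = 'v' ∨ a = '<' ∨ a = '>' ∨ pvDirOf a = none := by
    by_cases a1 : a = '^'; · exact Or.inl a1
    by_cases a2 : a = 'v'; · exact Or.inr (Or.inl a2)
    by_cases a3 : a = '<'; · exact Or.inr (Or.inr (Or.inl a3))
    by_cases a4 : a = '>'; · exact Or.inr (Or.inr (Or.inr (Or.inl a4)))
    exact Or.inr (Or.inr (Or.inr (Or.inr (by simp [pvDirOf, a1, a2, a3, a4]))))
  unfold pvCellOf at hc
  split_ifs at hc with h1 h2 h3 h4 h5 h6 h7 h8 h9 h10 h11 <;>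
    (injection hc with hc; subst hc; subst_vars;
     rcases hdir with rfl | rfl | rfl | rfl | hnone
     · decide
     · decide
     · decide
     · decide
     · rw [hnone]; exact pv_move_none_of_not_dir _ _ hnone)

set_option maxHeartbeats 1600000 in
theorem pv_numget_shape (k v : List Char)
    (h : (PySem.Dict.ofList pvNumKeys).get? k = some v) :
    k ∈ pvKeyStrs ∧ ∃ x y, k = [x, y] ∧ pvCellOf y ≠ none := by
  have hk : k ∈ (PySem.Dict.ofList pvNumKeys).keys := by
    by_contra hk
    rw [(PySem.Dict.get?_eq_none_iff_not_mem_keys _ _).mpr hk] at h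
    exact absurd h (by simp)
  have hkeq : (PySem.Dict.ofList pvNumKeys).keys = pvKeyStrs := by decide
  rw [hkeq] at hk
  have hk2 := hk
  refine ⟨hk2, ?_⟩
  simp only [pvKeyStrs, List.mem_cons, List.not_mem_nil, or_false] at hk2
  rcases hk2 with rfl|rfl|rfl|rfl|rfl|rfl|rfl|rfl|rfl|rfl|rfl|rfl|rfl|rfl|rfl|rfl|rfl|rfl|rfl|rfl|rfl|rfl|rfl|rfl|rfl|rfl|rfl|rfl|rfl|rfl <;>
    exact ⟨_, _, rfl, by decide⟩

set_option maxHeartbeats 1600000 in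
theorem pv_pos_cell (c : Char) (cell : Int × Int) (hc : pvCellOf c = some cell) :
    pvPOS.get? [c] = some cell := by
  unfold pvCellOf at hc
  split_ifs at hc with h1 h2 h3 h4 h5 h6 h7 h8 h9 h10 h11 <;>
    (injection hc with hc; subst hc; subst_vars; decide)

set_option maxHeartbeats 1600000 in
theorem pv_pos_shape (s : List Char) (cell : Int × Int) (h : pvPOS.get? s = some cell) :
    ∃ c, s = [c] ∧ pvCellOf c = some cell := by
  have hk : s ∈ pvPOS.keys := by
    by_contra hk
    rw [(PySem.Dict.get?_eq_none_iff_not_mem_keys _ _).mpr hk] at h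
    exact absurd h (by simp)
  have hkeys : pvPOS.keys = [['7'],['8'],['9'],['4'],['5'],['6'],['1'],['2'],['3'],['0'],['A']] := by decide
  rw [hkeys] at hk
  simp only [List.mem_cons, List.not_mem_nil, or_false] at hk
  rcases hk with rfl|rfl|rfl|rfl|rfl|rfl|rfl|rfl|rfl|rfl|rfl <;>
    (refine ⟨_, rfl, ?_⟩; rw [← h]; decide)

set_option maxHeartbeats 1600000 in
theorem pv_startcell_eq (start : String) : pvPOS.get? start.toList = pvStartCell start := by
  unfold pvStartCell
  cases hp : pvPOS.get? start.toList with
  | some cell =>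
    obtain ⟨c, hc1, hc2⟩ := pv_pos_shape _ _ hp
    rw [hc1]; exact hc2.symm
  | none =>
    cases hs : start.toList with
    | nil => rfl
    | cons a t =>
      cases t with
      | cons b t' => simp
      | nil =>
        cases hval : pvCellOf a with
        | none => simp [hval]
        | some cell => rw [hs, pv_pos_cell a cell hval] at hp; exact absurd hp (by simp)

set_option maxHeartbeats 1600000 in
theorem pv_delta_eq (b : List Char) :
    pvDELTA.get? b = (match b with | [d] => pvDirOf d | _ => none) := by
  have hmk : pvDELTA = PySem.Dict.mk [(['^'],(-1,0)),(['v'],(1,0)),(['<'],(0,-1)),(['>'],(0,1))] := by decide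
  match b with
  | [] => decide
  | (a :: e :: t) =>
    rw [hmk]
    simp [PySem.Dict.get?]
  | [a] =>
    by_cases a1 : a = '^'
    · subst a1; decide
    by_cases a2 : a = 'v'
    · subst a2; decide
    by_cases a3 : a = '<'
    · subst a3; decide
    by_cases a4 : a = '>'
    · subst a4; decide
    rw [hmk]
    simp [pvDirOf, a1, a2, a3, a4, Ne.symm a1, Ne.symm a2, Ne.symm a3, Ne.symm a4, PySem.Dict.get?]

theorem pv_cells_eq (p : Int × Int) : PySem.Set.contains pvCellsB p = pvOnPad p := by
  have hmem : ∀ q ∈ pvCellsB, pvOnPad q = true := by decide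
  rcases p with ⟨r, c⟩
  by_cases h : pvOnPad (r, c) = true
  · rw [h]
    have hb := h
    simp [pvOnPad] at hb
    obtain ⟨h14, h5⟩ := hb
    have hr : r = 0 ∨ r = 1 ∨ r = 2 ∨ r = 3 := by omega
    have hcc : c = 0 ∨ c = 1 ∨ c = 2 := by omega
    have h5' : ¬ (r = 3 ∧ c = 0) := by omega
    rcases hr with rfl | rfl | rfl | rfl <;> rcases hcc with rfl | rfl | rfl <;>
      first | (exact absurd ⟨rfl, rfl⟩ h5') | decide
  · rw [Bool.not_eq_true] at h
    rw [h]
    by_contra hb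
    rw [Bool.not_eq_false] at hb
    have := hmem _ ((PySem.Set.contains_iff _ _).mp hb)
    rw [this] at h
    exact absurd h (by simp)

-- ---------- walk correspondence ----------

theorem pv_walkAB (bs : List (List Char)) (c : Char) (cell : Int × Int)
    (hc : pvCellOf c = some cell) :
    (pvLoopA [c] bs).isSome = pvLoopB (some cell) bs := by
  induction bs generalizing c cell with
  | nil => rfl
  | cons b rest ih =>
    show (match move_numeric_robot b [c] with
          | none => none
          | some sq' => pvLoopA sq' rest).isSome = _
    match b with
    | [] =>
      have hmv : move_numeric_robot [] [c] = none := by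
        cases hm : move_numeric_robot [] [c] with
        | none => rfl
        | some v =>
          obtain ⟨_, x, y, hk, _⟩ := pv_numget_shape _ _ hm
          exact absurd hk (by simp)
      rw [hmv, pvLoopB, pv_delta_eq]
      rfl
    | (a :: e :: t) =>
      have hmv : move_numeric_robot (a :: e :: t) [c] = none := by
        cases hm : move_numeric_robot (a :: e :: t) [c] with
        | none => rfl
        | some v =>
          obtain ⟨_, x, y, hk, _⟩ := pv_numget_shape _ _ hm
          simp only [move_numeric_robot] at hm
          simp only [List.cons_append, List.cons.injEq] at hk
          obtain ⟨rfl, rfl, h3⟩ := hk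
          exact absurd h3 (by simp)
      rw [hmv, pvLoopB, pv_delta_eq]
      rfl
    | [a] =>
      rw [pv_step_eq a c cell hc, pvLoopB, pv_delta_eq]
      have hred : (match [a] with | [d] => pvDirOf d | _ => none) = pvDirOf a := rfl
      rw [hred]
      cases hd : pvDirOf a with
      | none => rfl
      | some d =>
        simp only []
        by_cases hpad : pvOnPad (cell.1 + d.1, cell.2 + d.2) = true
        · rw [if_pos hpad, pv_cells_eq, hpad, if_pos rfl]
          exact ih _ _ (pv_pad_cell _ hpad)
        · rw [Bool.not_eq_true] at hpad
          rw [if_neg (by rw [hpad]; exact Bool.false_ne_true), pv_cells_eq, hpad]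
          rfl

theorem pv_walkOkB (bs : List String) (cur : Option (Int × Int)) :
    pvWalkOk cur bs = pvLoopB cur (bs.map String.toList) := by
  induction bs generalizing cur with
  | nil => cases cur <;> rfl
  | cons b rest ih =>
    cases cur with
    | none => rfl
    | some c =>
      show pvWalkOk (some c) (b :: rest) = pvLoopB (some c) (b.toList :: rest.map String.toList)
      rw [pvWalkOk, pvLoopB, pv_delta_eq]
      match hb : b.toList with
      | [] => rfl
      | (a :: e :: t) => simp
      | [d] =>
        simp only [if_pos rfl]
        cases hd : pvDirOf d with
        | none => simp [hd]
        | some dd =>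
          simp only [hd, pv_cells_eq]
          by_cases hpad : pvOnPad (c.1 + dd.1, c.2 + dd.2) = true
          · rw [hpad]
            simp only [if_pos rfl]
            exact ih _
          · rw [Bool.not_eq_true] at hpad
            rw [hpad]
            simp

theorem pv_split2 (u s : List Char) (x y : Char) (h : u ++ s = [x, y]) :
    (u = [] ∧ s = [x, y]) ∨ (u = [x] ∧ s = [y]) ∨ (u = [x, y] ∧ s = []) := by
  match u with
  | [] => exact Or.inl ⟨rfl, h⟩
  | [a] =>
    simp only [List.cons_append, List.nil_append, List.cons.injEq] at h
    exact Or.inr (Or.inl ⟨by rw [h.1], h.2⟩)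
  | (a :: e :: t) =>
    simp only [List.cons_append, List.cons.injEq] at h
    obtain ⟨rfl, rfl, h3⟩ := h
    have : t = [] ∧ s = [] := by
      rcases List.append_eq_nil_iff.mp h3 with ⟨h4, h5⟩; exact ⟨h4, h5⟩
    exact Or.inr (Or.inr ⟨by rw [this.1], this.2⟩)

theorem pv_walk_main (start : String) (bs0 : List String) (hcor : ¬ pvCorner start bs0) :
    (pvLoopA start.toList (bs0.map String.toList)).isSome
      = pvLoopB (pvPOS.get? start.toList) (bs0.map String.toList) := by
  cases hp : pvPOS.get? start.toList with
  | some cell =>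
    obtain ⟨c, hc1, hc2⟩ := pv_pos_shape _ _ hp
    rw [hc1]
    exact pv_walkAB _ _ _ hc2
  | none =>
    cases bs0 with
    | nil => rfl
    | cons b rest =>
      have hmv : move_numeric_robot b.toList start.toList = none := by
        cases hm : move_numeric_robot b.toList start.toList with
        | none => rfl
        | some v =>
          obtain ⟨hkmem, x, y, hk, hcy⟩ := pv_numget_shape _ _ hm
          rcases pv_split2 _ _ _ _ hk with ⟨h1, h2⟩ | ⟨h1, h2⟩ | ⟨h1, h2⟩
          · exact (hcor ⟨b, by simp, Or.inr ⟨h1, by rw [h2, ← hk]; exact hkmem⟩⟩).elim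
          · cases hval : pvCellOf y with
            | none => exact absurd hval hcy
            | some w => rw [h2, pv_pos_cell y w hval] at hp; exact absurd hp (by simp)
          · exact (hcor ⟨b, by simp, Or.inl ⟨h2, by rw [h1, ← hk]; exact hkmem⟩⟩).elim
      show (match move_numeric_robot b.toList start.toList with
            | none => none
            | some sq' => pvLoopA sq' (rest.map String.toList)).isSome = false
      rw [hmv]
      rfl

-- ---------- phase-2 lemmas ----------

theorem pv_T_cons_cons (u v : List Char) (t : List (List Char)) :
    pvT (u :: v :: t) = (if u = v then 0 else 1) + pvT (v :: t) := by
  show ((u, v) :: (v :: t).zip t).countP (fun p => !(p.1 == p.2)) = _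
  rw [List.countP_cons]
  by_cases h : u = v
  · simp [pvT, h, Nat.add_comm]
  · simp [pvT, h, Nat.add_comm]

theorem pv_T_const (bs : List (List Char)) (x : List Char) (h : ∀ u ∈ bs, u = x) :
    pvT bs = 0 := by
  induction bs with
  | nil => rfl
  | cons u t ih =>
    cases t with
    | nil => rfl
    | cons v t' =>
      rw [pv_T_cons_cons, if_pos (by rw [h u (by simp), h v (by simp)]),
        ih (fun w hw => h w (by simp [hw]))]

theorem pv_const_of_T_zero (z : List Char) (t : List (List Char)) (h : pvT (z :: t) = 0) :
    ∀ u ∈ z :: t, u = z := by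
  induction t generalizing z with
  | nil => intro u hu; simpa using hu
  | cons v t' ih =>
    rw [pv_T_cons_cons] at h
    by_cases hzv : z = v
    · rw [if_pos hzv, Nat.zero_add] at h
      intro u hu
      rcases List.mem_cons.mp hu with rfl | hu
      · rfl
      · rw [ih v h u hu, hzv]
    · rw [if_neg hzv] at h
      omega

theorem pv_T_block (a b : Nat) (x y : List Char) :
    pvT (List.replicate a x ++ List.replicate b y) ≤ 1 := by
  induction a with
  | zero =>
    rw [List.replicate_zero, List.nil_append,
      pv_T_const (List.replicate b y) y (fun u hu => List.eq_of_mem_replicate hu)]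
    omega
  | succ a' ih =>
    rw [List.replicate_succ, List.cons_append]
    cases ha' : a' with
    | succ a'' =>
      rw [List.replicate_succ, List.cons_append, pv_T_cons_cons, if_pos rfl, Nat.zero_add,
        ← List.cons_append, ← List.replicate_succ]
      rw [ha'] at ih
      exact ih
    | zero =>
      rw [List.replicate_zero, List.nil_append]
      cases b with
      | zero => rw [List.replicate_zero]; simp [pvT]
      | succ b' =>
        rw [List.replicate_succ, pv_T_cons_cons,
          pv_T_const (y :: List.replicate b' y) y
            (fun u hu => by
              rcases List.mem_cons.mp hu with rfl | hu
              · rfl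
              · exact List.eq_of_mem_replicate hu)]
        split_ifs <;> omega

theorem pv_block_of_T (bs : List (List Char)) (x y : List Char) (t : List (List Char))
    (hbs : bs = x :: t) (hxy : x ≠ y) (hmem : ∀ u ∈ bs, u = x ∨ u = y) (hy : y ∈ bs)
    (hT : pvT bs ≤ 1) :
    ∃ a b, 1 ≤ a ∧ 1 ≤ b ∧ bs = List.replicate a x ++ List.replicate b y := by
  subst hbs
  induction t generalizing x with
  | nil =>
    rcases List.mem_singleton.mp hy with rfl
    exact absurd rfl hxy
  | cons z t' ih =>
    by_cases hzx : z = x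
    · subst hzx
      have hy' : y ∈ z :: t' := by
        rcases List.mem_cons.mp hy with rfl | hy'
        · exact absurd rfl (Ne.symm hxy)
        · exact hy'
      have hT' : pvT (z :: t') ≤ 1 := by
        rw [pv_T_cons_cons, if_pos rfl, Nat.zero_add] at hT
        exact hT
      obtain ⟨a, b, ha, hb, heq⟩ :=
        ih z hxy (fun u hu => hmem u (List.mem_cons_of_mem z hu)) hy' hT'
      refine ⟨a + 1, b, by omega, hb, ?_⟩
      rw [List.replicate_succ, List.cons_append, ← heq]
    · have hzy : z = y := by
        rcases hmem z (by simp) with h | h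
        · exact absurd h hzx
        · exact h
      subst hzy
      rw [pv_T_cons_cons, if_neg hxy] at hT
      have hT0 : pvT (z :: t') = 0 := by omega
      have hconst := pv_const_of_T_zero z t' hT0
      refine ⟨1, t'.length + 1, le_refl 1, by omega, ?_⟩
      rw [List.replicate_one, List.replicate_succ]
      show x :: z :: t' = [x] ++ z :: List.replicate t'.length z
      congr 1
      congr 1
      exact List.eq_replicate_of_mem (fun u hu => hconst u (by simp [hu]))

theorem pv_block_get (n m : Nat) (x y : List Char) (k : Nat)
    (hk : k < (List.replicate n x ++ List.replicate m y).length) :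
    (List.replicate n x ++ List.replicate m y)[k] = if k < n then x else y := by
  by_cases h : k < n
  · rw [if_pos h, List.getElem_append_left (by simpa using h), List.getElem_replicate]
  · rw [if_neg h, List.getElem_append_right (by simpa using h), List.getElem_replicate]

theorem pv_mem_E (bs : List (List Char)) (c : List Char) (i : Int) :
    i ∈ pvE bs c ↔ ∃ (k : Nat), ∃ (_ : k < bs.length), bs[k] = c ∧ i = (k : Int) := by
  simp only [pvE, List.mem_map, List.mem_filter, PySem.List.mem_enumerate_iff, beq_iff_eq]
  constructor
  · rintro ⟨q, ⟨⟨a, ⟨k, hk, rfl⟩, rfl⟩, hq⟩, rfl⟩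
    exact ⟨k, hk, hq, by simp⟩
  · rintro ⟨k, hk, hc, rfl⟩
    exact ⟨((0 + (k : Int), bs[k])).swap, ⟨⟨(0 + (k : Int), bs[k]), ⟨k, hk, rfl⟩, rfl⟩, hc⟩,
      by simp⟩

theorem pv_getD_DD (bs : List (List Char)) (c : List Char) :
    (pvDD bs).getD c [] = pvE bs c := by
  have h := PySem.Dict.getD_foldl_modify_append
    ((PySem.List.enumerate bs).map Prod.swap) (PySem.Dict.empty (κ := List Char) (ν := List Int)) c
  rw [List.foldl_map] at h
  have h2 : (pvDD bs).getD c [] =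
      PySem.Dict.empty.getD c [] ++
        List.map (fun x => x.2)
          (List.filter (fun p => p.1 == c) ((PySem.List.enumerate bs).map Prod.swap)) := h
  rw [h2, PySem.Dict.getD_empty, List.nil_append]
  rfl

theorem pv_keys_DD (bs : List (List Char)) :
    (pvDD bs).keys = PySem.Set.ofList bs := by
  have h := PySem.Dict.keys_foldl_modify_key (PySem.List.enumerate bs) (fun p => p.2) []
    (fun _ p => (fun l => l ++ [p.1])) PySem.Dict.empty
  have h2 : (pvDD bs).keys
      = PySem.Set.update PySem.Dict.empty.keys ((PySem.List.enumerate bs).map (fun p => p.2)) := h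
  rw [h2, PySem.Dict.keys_empty, PySem.Set.update_nil_left, PySem.List.map_snd_enumerate]

theorem pv_nodup_keys_DD (bs : List (List Char)) : (pvDD bs).keys.Nodup := by
  rw [pv_keys_DD]
  exact PySem.Set.nodup_ofList bs

theorem pv_size_DD (bs : List (List Char)) :
    (pvDD bs).size = (PySem.Set.ofList bs).length := by
  have h : (pvDD bs).size = (pvDD bs).keys.length := by
    simp [PySem.Dict.size, PySem.Dict.keys]
  rw [h, pv_keys_DD]

theorem pv_phase2 (bs : List (List Char)) (hK : (PySem.Set.ofList bs).length < 3) :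
    (if (pvDD bs).size == 2 then
      match (pvDD bs).values with
      | [i1, i2] =>
        match PySem.List.max? i1 (fun v => v), PySem.List.min? i2 (fun v => v),
              PySem.List.max? i2 (fun v => v), PySem.List.min? i1 (fun v => v) with
        | some M1, some m2, some M2, some m1 => decide (M1 < m2) || decide (M2 < m1)
        | _, _, _, _ => false
      | _ => false
    else true) = decide (pvT bs ≤ 1) := by
  have hc3 : (PySem.Set.ofList bs).length = 0 ∨ (PySem.Set.ofList bs).length = 1 ∨
      (PySem.Set.ofList bs).length = 2 := by omega
  rcases hc3 with h0 | h1 | h2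
  -- no distinct button
  · have hnil : bs = [] := by
      cases bs with
      | nil => rfl
      | cons b t =>
        have : b ∈ PySem.Set.ofList (b :: t) := (PySem.Set.mem_ofList _ _).mpr (by simp)
        rw [List.length_eq_zero_iff.mp h0] at this
        exact absurd this (by simp)
    subst hnil
    decide
  -- one distinct button
  · obtain ⟨x, hK1⟩ := List.length_eq_one_iff.mp h1
    have hall : ∀ u ∈ bs, u = x := by
      intro u hu
      have : u ∈ PySem.Set.ofList bs := (PySem.Set.mem_ofList _ _).mpr hu
      rw [hK1] at this
      simpa using this
    have hsz : (pvDD bs).size = 1 := by rw [pv_size_DD, hK1]; rfl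
    rw [if_neg (by rw [hsz]; exact of_decide_eq_false rfl), pv_T_const bs x hall]
    decide
  -- two distinct buttons
  · obtain ⟨x, y, hK2⟩ := List.length_eq_two.mp h2
    have hnd := PySem.Set.nodup_ofList bs
    rw [hK2] at hnd
    have hxney : x ≠ y := by simpa using (List.nodup_cons.mp hnd).1
    have hxbs : x ∈ bs := (PySem.Set.mem_ofList _ _).mp (by rw [hK2]; simp)
    have hybs : y ∈ bs := (PySem.Set.mem_ofList _ _).mp (by rw [hK2]; simp)
    have hall : ∀ u ∈ bs, u = x ∨ u = y := by
      intro u hu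
      have : u ∈ PySem.Set.ofList bs := (PySem.Set.mem_ofList _ _).mpr hu
      rw [hK2] at this
      simpa using this
    obtain ⟨tail, hhead⟩ : ∃ t, bs = x :: t := by
      cases hbs : bs with
      | nil => rw [hbs] at hK2; exact absurd hK2 (by simp [PySem.Set.ofList_nil])
      | cons b t =>
        refine ⟨t, ?_⟩
        have hofl := PySem.Set.ofList_cons b t
        rw [← hbs, hK2] at hofl
        have hb : x = b := (List.cons.injEq _ _ _ _ ▸ hofl).1
        rw [← hb]
    -- reduce A's phase-2 expression
    have hsz : (pvDD bs).size = 2 := by rw [pv_size_DD, hK2]; rfl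
    have hvalues : (pvDD bs).values = [pvE bs x, pvE bs y] := by
      rw [PySem.Dict.values_eq_map_keys (pvDD bs) (pv_nodup_keys_DD bs) [], pv_keys_DD, hK2]
      simp [pv_getD_DD]
    rw [if_pos (by rw [hsz]; rfl), hvalues]
    -- the four extrema exist
    have hEx : pvE bs x ≠ [] := by
      obtain ⟨k, hk, hbk⟩ := List.getElem_of_mem hxbs
      exact List.ne_nil_of_mem ((pv_mem_E bs x (k : Int)).mpr ⟨k, hk, hbk, rfl⟩)
    have hEy : pvE bs y ≠ [] := by
      obtain ⟨k, hk, hbk⟩ := List.getElem_of_mem hybs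
      exact List.ne_nil_of_mem ((pv_mem_E bs y (k : Int)).mpr ⟨k, hk, hbk, rfl⟩)
    obtain ⟨M1, hM1⟩ : ∃ M1, PySem.List.max? (pvE bs x) (fun v => v) = some M1 := by
      cases hm : PySem.List.max? (pvE bs x) (fun v => v) with
      | none => exact absurd ((PySem.List.max?_eq_none_iff _ _).mp hm) hEx
      | some m => exact ⟨m, rfl⟩
    obtain ⟨m2, hm2⟩ : ∃ m2, PySem.List.min? (pvE bs y) (fun v => v) = some m2 := by
      cases hm : PySem.List.min? (pvE bs y) (fun v => v) with
      | none => exact absurd ((PySem.List.min?_eq_none_iff _ _).mp hm) hEy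
      | some m => exact ⟨m, rfl⟩
    obtain ⟨M2, hM2⟩ : ∃ M2, PySem.List.max? (pvE bs y) (fun v => v) = some M2 := by
      cases hm : PySem.List.max? (pvE bs y) (fun v => v) with
      | none => exact absurd ((PySem.List.max?_eq_none_iff _ _).mp hm) hEy
      | some m => exact ⟨m, rfl⟩
    obtain ⟨m1, hm1⟩ : ∃ m1, PySem.List.min? (pvE bs x) (fun v => v) = some m1 := by
      cases hm : PySem.List.min? (pvE bs x) (fun v => v) with
      | none => exact absurd ((PySem.List.min?_eq_none_iff _ _).mp hm) hEx
      | some m => exact ⟨m, rfl⟩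
    simp only []
    rw [hM1, hm2, hM2, hm1]
    show (decide (M1 < m2) || decide (M2 < m1)) = decide (pvT bs ≤ 1)
    -- the always-true bounds: m1 ≤ 0 ≤ M2
    have h0x : (0 : Int) ∈ pvE bs x := by
      refine (pv_mem_E bs x 0).mpr ⟨0, by rw [hhead]; simp, ?_, rfl⟩
      simp [hhead]
    have hm1le : m1 ≤ 0 := PySem.List.min?_isMin hm1 0 h0x
    have hM2ge : (0 : Int) ≤ M2 := by
      obtain ⟨k, hk, _, hkM⟩ := (pv_mem_E bs y M2).mp (PySem.List.max?_mem hM2)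
      omega
    by_cases hT : pvT bs ≤ 1
    · -- block shape, hence max(i1) < min(i2)
      rw [decide_eq_true hT]
      obtain ⟨a, b, ha, hb, heq⟩ := pv_block_of_T bs x y tail hhead hxney hall hybs hT
      have hlt : M1 < m2 := by
        obtain ⟨k1, hk1, hb1, hM1k⟩ := (pv_mem_E bs x M1).mp (PySem.List.max?_mem hM1)
        obtain ⟨k2, hk2, hb2, hm2k⟩ := (pv_mem_E bs y m2).mp (PySem.List.min?_mem hm2)
        have hk1' : k1 < a := by
          by_contra hlt
          simp only [heq] at hb1
          rw [pv_block_get a b x y k1 (by rw [← heq]; exact hk1), if_neg hlt] at hb1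
          exact hxney hb1.symm
        have hk2' : ¬ k2 < a := by
          intro hlt
          simp only [heq] at hb2
          rw [pv_block_get a b x y k2 (by rw [← heq]; exact hk2), if_pos hlt] at hb2
          exact hxney hb2
        omega
      rw [decide_eq_true hlt, Bool.true_or]
    · -- not a block: both disjuncts are false
      rw [decide_eq_false hT]
      have hnlt2 : ¬ M2 < m1 := by omega
      have hnlt1 : ¬ M1 < m2 := by
        intro hlt
        apply hT
        obtain ⟨k1, hk1, hb1, hM1k⟩ := (pv_mem_E bs x M1).mp (PySem.List.max?_mem hM1)
        have hpt : ∀ (k : Nat) (hk : k < bs.length), bs[k] = if (k : Int) ≤ M1 then x else y := by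
          intro k hk
          by_cases hkM : (k : Int) ≤ M1
          · rw [if_pos hkM]
            rcases hall bs[k] (List.getElem_mem hk) with h | h
            · exact h
            · exfalso
              have : (k : Int) ∈ pvE bs y := (pv_mem_E bs y k).mpr ⟨k, hk, h, rfl⟩
              have := PySem.List.min?_isMin hm2 _ this
              simp only [] at this
              omega
          · rw [if_neg hkM]
            rcases hall bs[k] (List.getElem_mem hk) with h | h
            · exfalso
              have : (k : Int) ∈ pvE bs x := (pv_mem_E bs x k).mpr ⟨k, hk, h, rfl⟩
              have := PySem.List.max?_isMax hM1 _ this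
              simp only [] at this
              omega
            · exact h
        have hblock : bs = List.replicate (M1 + 1).toNat x
            ++ List.replicate (bs.length - (M1 + 1).toNat) y := by
          apply List.ext_getElem
          · simp; omega
          · intro k hk hk'
            rw [pv_block_get, hpt k hk]
            have : (k : Int) ≤ M1 ↔ k < (M1 + 1).toNat := by omega
            by_cases hkM : (k : Int) ≤ M1
            · rw [if_pos hkM, if_pos (this.mp hkM)]
            · rw [if_neg hkM, if_neg (fun hc => hkM (this.mpr hc))]
        rw [hblock]
        exact pv_T_block _ _ _ _
      rw [decide_eq_false hnlt1, decide_eq_false hnlt2, Bool.false_or]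

-- ===== VERDICT (by name: the statement is the Claim_ definition above) =====
theorem is_reasonable_num_permutation_spec : Claim_equal_is_reasonable_num_permutation := by
  intro start bs0 _ hpre
  obtain ⟨hcor, hraise⟩ := hpre
  unfold Spec_is_reasonable_num_permutation
  have hAeq : is_reasonable_num_permutation start bs0 =
      (match pvLoopA start.toList (bs0.map String.toList) with
       | none => false
       | some _ =>
         if (pvDD (bs0.map String.toList)).size == 2 then
           match (pvDD (bs0.map String.toList)).values with
           | [i1, i2] =>
             match PySem.List.max? i1 (fun v => v), PySem.List.min? i2 (fun v => v),
                   PySem.List.max? i2 (fun v => v), PySem.List.min? i1 (fun v => v) with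
             | some M1, some m2, some M2, some m1 => decide (M1 < m2) || decide (M2 < m1)
             | _, _, _, _ => false
           | _ => false
         else true) := rfl
  have hBeq : is_reasonable_num_permutation_alt start bs0 =
      (if pvLoopB (pvPOS.get? start.toList) (bs0.map String.toList) then
        decide (pvT (bs0.map String.toList) ≤ 1)
      else false) := rfl
  rw [hAeq, hBeq]
  have hwalk := pv_walk_main start bs0 hcor
  cases hA : pvLoopA start.toList (bs0.map String.toList) with
  | none =>
    rw [hA] at hwalk
    simp only [Option.isSome_none] at hwalk
    rw [← hwalk]
    rfl
  | some sq =>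
    rw [hA] at hwalk
    simp only [Option.isSome_some] at hwalk
    rw [← hwalk]
    simp only [if_pos rfl]
    have hlen : (PySem.Set.ofList (bs0.map String.toList)).length < 3 := by
      by_contra hge
      exact hraise ⟨by rw [pv_walkOkB, ← pv_startcell_eq, ← hwalk], by omega⟩
    exact pv_phase2 (bs0.map String.toList) hlen
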